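-- pv_equiv track=rewrite | github.com/happypildo/Algorithm_stduy | Algorithms_solution_code/Implementation/Implementation_SAMSUNG_마법의숲탐색.py | get_lower_bound
-- ===== SOURCE A (Python) =====
-- from collections import deque
--
-- DIRECTION = [[-1, 0], [0, 1], [1, 0], [0, -1], [0, 0]]
--
-- def get_lower_bound(R, C, forest, graph, idx_graph, own_id):
--     locations, dir = graph[own_id]
--     esc_x, esc_y = locations[dir]
--
--     queue = deque()
--     queue.append((esc_x, esc_y, own_id))
--
--     is_visited = set()
--     is_visited.add((esc_x, esc_y))
--
--     lowest_x = locations[2][0]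
--     while queue:
--         esc_x, esc_y, own_id = queue.popleft()
--
--         for dx, dy in DIRECTION[:-1]:
--             temp_x, temp_y = esc_x + dx, esc_y + dy
--             if (-1 < temp_x < R + 3) and (-1 < temp_y < C):
--                 c = forest[temp_x][temp_y]
--                 if c == 0 or c == 1 or c == own_id: continue
--                 n_key = idx_graph[(temp_x, temp_y)]
--                 neighbor_locations, dir = graph[n_key]
--                 n_x, n_y = neighbor_locations[dir]
--
--                 if (n_x, n_y) in is_visited: continue
--
--                 queue.append((n_x, n_y, n_key))
--                 is_visited.add((n_x, n_y))
--
--                 lowest_x = neighbor_locations[2][0] if lowest_x < neighbor_locations[2][0] else lowest_x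
--
--     return lowest_x - 2
-- ===== SOURCE B (Python) =====
-- def get_lower_bound(R, C, forest, graph, idx_graph, own_id):
--     locs, d = graph[own_id]
--     start = locs[d]
--     seen = {start: own_id}
--
--     def dfs(gid, x, y):
--         for dx, dy in ((-1, 0), (0, 1), (1, 0), (0, -1)):
--             tx, ty = x + dx, y + dy
--             if 0 <= tx < R + 3 and 0 <= ty < C:
--                 c = forest[tx][ty]
--                 if c == 0 or c == 1 or c == gid:
--                     continue
--                 nid = idx_graph[(tx, ty)]
--                 nlocs, nd = graph[nid]
--                 ncoord = nlocs[nd]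
--                 if ncoord in seen:
--                     continue
--                 seen[ncoord] = nid
--                 dfs(nid, *ncoord)
--
--     dfs(own_id, *start)
--     return max(graph[g][0][2][0] for g in seen.values()) - 2
-- ===== Notes on version B (the rewrite author's own statement) =====
-- stated objective: alternative
-- what changed: Replaces the deque-driven BFS that folds a running maximum into each push by a recursive depth-first search that only records discovered golems in a coord-to-id dict, with the answer computed at the end as a max over that dict's values; correct because the answer is a maximum over the reachable component, which is traversal-order independent.
import Mathlib
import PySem

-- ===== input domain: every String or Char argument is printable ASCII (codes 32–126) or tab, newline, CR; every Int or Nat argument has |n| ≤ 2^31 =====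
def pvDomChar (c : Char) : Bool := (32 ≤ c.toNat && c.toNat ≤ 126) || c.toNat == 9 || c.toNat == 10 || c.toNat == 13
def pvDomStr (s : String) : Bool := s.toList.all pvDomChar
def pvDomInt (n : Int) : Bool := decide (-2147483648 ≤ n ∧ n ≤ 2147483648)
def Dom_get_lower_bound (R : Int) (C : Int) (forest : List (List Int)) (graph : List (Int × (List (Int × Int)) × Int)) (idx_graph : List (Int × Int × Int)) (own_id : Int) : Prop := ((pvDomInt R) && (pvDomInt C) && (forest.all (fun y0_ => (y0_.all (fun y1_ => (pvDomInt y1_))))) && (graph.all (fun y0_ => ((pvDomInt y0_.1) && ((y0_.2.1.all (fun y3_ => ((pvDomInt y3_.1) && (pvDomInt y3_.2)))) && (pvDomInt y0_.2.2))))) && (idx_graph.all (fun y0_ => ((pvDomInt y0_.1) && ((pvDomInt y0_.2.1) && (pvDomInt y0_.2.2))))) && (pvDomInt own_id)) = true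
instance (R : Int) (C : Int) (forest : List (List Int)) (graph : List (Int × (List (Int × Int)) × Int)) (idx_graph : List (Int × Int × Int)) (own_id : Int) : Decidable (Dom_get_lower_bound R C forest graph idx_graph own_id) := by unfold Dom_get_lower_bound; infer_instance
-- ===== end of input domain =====

-- B replaces A's deque-driven BFS (which folds a running maximum into each push) by a
-- recursive depth-first search that only records discovered golems in a coord→id map and
-- takes the maximum at the end; equal return values are proved on Pre_ (a well-formedness
-- precondition, see its comment), where the answer is a traversal-order-independent maximum.

-- a node of the search: (escape coordinate, golem id)
abbrev PvNode := (Int × Int) × Int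

-- ===== PORT A =====  (literal transliteration of the Python BFS; errors propagate as none)
-- Python dict lookup = the unique key's value (Pre_ requires graph's key list duplicate-free)
def pvGLook (graph : List (Int × (List (Int × Int)) × Int)) (k : Int) :
    Option ((List (Int × Int)) × Int) :=
  (graph.find? (fun e => e.1 == k)).map (fun e => e.2)

def pvILook (ig : List (Int × Int × Int)) (x y : Int) : Option Int :=
  (ig.find? (fun e => e.1 == x && e.2.1 == y)).map (fun e => e.2.2)

-- forest[x][y] (IndexError = none)
def pvCell (forest : List (List Int)) (x y : Int) : Option Int :=
  (PySem.List.pyGet? forest x).bind (fun row => PySem.List.pyGet? row y)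

def pvDirs : List (Int × Int) := [(-1, 0), (0, 1), (1, 0), (0, -1), (0, 0)]

def bfsStep (R C : Int) (forest : List (List Int)) (graph : List (Int × (List (Int × Int)) × Int))
    (idx_graph : List (Int × Int × Int)) (node : PvNode)
    (acc : Option (List PvNode × PySem.Set (Int × Int) × Int)) (d : Int × Int) :
    Option (List PvNode × PySem.Set (Int × Int) × Int) :=
  acc.bind (fun st =>
    let tx := node.1.1 + d.1
    let ty := node.1.2 + d.2
    if (-1 < tx ∧ tx < R + 3) ∧ (-1 < ty ∧ ty < C) then
      match pvCell forest tx ty with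
      | none => none
      | some c =>
        if c = 0 ∨ c = 1 ∨ c = node.2 then some st
        else
          match pvILook idx_graph tx ty with
          | none => none
          | some nkey =>
            match pvGLook graph nkey with
            | none => none
            | some nb =>
              match PySem.List.pyGet? nb.1 nb.2 with
              | none => none
              | some ncd =>
                if PySem.Set.contains st.2.1 ncd then some st
                else
                  match PySem.List.pyGet? nb.1 2 with
                  | none => none
                  | some l2 =>
                    some (st.1 ++ [(ncd, nkey)], PySem.Set.add st.2.1 ncd,
                          if st.2.2 < l2.1 then l2.1 else st.2.2)
    else some st)

def bfsExpand (R C : Int) (forest : List (List Int)) (graph : List (Int × (List (Int × Int)) × Int))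
    (idx_graph : List (Int × Int × Int)) (node : PvNode)
    (q : List PvNode) (vis : PySem.Set (Int × Int)) (low : Int) :
    Option (List PvNode × PySem.Set (Int × Int) × Int) :=
  (pvDirs.dropLast).foldl (bfsStep R C forest graph idx_graph node) (some (q, vis, low))

def bfsLoop (R C : Int) (forest : List (List Int)) (graph : List (Int × (List (Int × Int)) × Int))
    (idx_graph : List (Int × Int × Int)) :
    Nat → List PvNode → PySem.Set (Int × Int) → Int → Option Int
  | 0, _, _, _ => none
  | f + 1, q, vis, low =>
    match q with
    | [] => some (low - 2)
    | n :: rest =>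
      match bfsExpand R C forest graph idx_graph n rest vis low with
      | none => none
      | some st => bfsLoop R C forest graph idx_graph f st.1 st.2.1 st.2.2

def get_lower_bound (R : Int) (C : Int) (forest : List (List Int)) (graph : List (Int × (List (Int × Int)) × Int)) (idx_graph : List (Int × Int × Int)) (own_id : Int) : Int :=
  match pvGLook graph own_id with
  | none => 0
  | some ld =>
    match PySem.List.pyGet? ld.1 ld.2, PySem.List.pyGet? ld.1 2 with
    | some esc, some l2 =>
      (bfsLoop R C forest graph idx_graph (graph.length + 2)
          [(esc, own_id)] (PySem.Set.add PySem.Set.empty esc) l2.1).getD 0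
    | _, _ => 0

-- ===== PORT B =====  (literal transliteration of Source B: recursive DFS recording a coord→id map)
-- first-match association lookups, written as Source B's dict accesses behave
def altGolem : List (Int × (List (Int × Int)) × Int) → Int → Option ((List (Int × Int)) × Int)
  | [], _ => none
  | e :: t, k => if e.1 = k then some e.2 else altGolem t k

def altIdx : List (Int × Int × Int) → Int → Int → Option Int
  | [], _, _ => none
  | e :: t, x, y => if e.1 = x ∧ e.2.1 = y then some e.2.2 else altIdx t x y

-- list indexing for a NON-NEGATIVE index (Source B only indexes forest after its 0 ≤ checks,
-- so this is exact at every call site); none = IndexError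
def altRow {α : Type} : List α → Int → Option α
  | [], _ => none
  | a :: t, i => if i = 0 then some a else if 0 < i then altRow t (i - 1) else none

def dfsDirsB : List (Int × Int) := [(-1, 0), (0, 1), (1, 0), (0, -1)]

-- dfs(gid, x, y) of Source B; the Nat fuel models the recursion (it never runs out on Pre_,
-- proved below); the seen dict is the association list of (coordinate, golem id)
def dfsB (R C : Int) (forest : List (List Int)) (graph : List (Int × (List (Int × Int)) × Int))
    (idx_graph : List (Int × Int × Int)) :
    Nat → Int → Int × Int → List (Int × Int) → List PvNode → Option (List PvNode)
  | _, _, _, [], seen => some seen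
  | fuel, gid, pos, d :: ds, seen =>
    let tx := pos.1 + d.1
    let ty := pos.2 + d.2
    if 0 ≤ tx ∧ tx < R + 3 ∧ 0 ≤ ty ∧ ty < C then
      match altRow forest tx with
      | none => none
      | some row =>
        match altRow row ty with
        | none => none
        | some c =>
          if c = 0 ∨ c = 1 ∨ c = gid then dfsB R C forest graph idx_graph fuel gid pos ds seen
          else
            match altIdx idx_graph tx ty with
            | none => none
            | some nid =>
              match altGolem graph nid with
              | none => none
              | some nb =>
                match PySem.List.pyGet? nb.1 nb.2 with
                | none => none
                | some ncd =>
                  if ncd ∈ seen.map (fun s => s.1) then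
                    dfsB R C forest graph idx_graph fuel gid pos ds seen
                  else if _hf : fuel = 0 then none
                  else
                    match dfsB R C forest graph idx_graph (fuel - 1) nid ncd dfsDirsB
                        (seen ++ [(ncd, nid)]) with
                    | none => none
                    | some seen2 => dfsB R C forest graph idx_graph fuel gid pos ds seen2
    else dfsB R C forest graph idx_graph fuel gid pos ds seen
  termination_by fuel _ _ ds _ => (fuel, ds.length)
  decreasing_by
    all_goals first
      | exact Prod.Lex.right _ (by simp)
      | exact Prod.Lex.left _ _ (by omega)

-- graph[g][0][2][0] (none = a raised lookup)
def altVal (graph : List (Int × (List (Int × Int)) × Int)) (g : Int) : Option Int :=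
  match altGolem graph g with
  | none => none
  | some e =>
    match PySem.List.pyGet? e.1 2 with
    | none => none
    | some p => some p.1

-- max(... for g in seen.values()) starting from the first value
def altMaxFrom (graph : List (Int × (List (Int × Int)) × Int)) : Int → List PvNode → Option Int
  | a, [] => some a
  | a, s :: t =>
    match altVal graph s.2 with
    | none => none
    | some v => altMaxFrom graph (max a v) t

def get_lower_bound_alt (R : Int) (C : Int) (forest : List (List Int)) (graph : List (Int × (List (Int × Int)) × Int)) (idx_graph : List (Int × Int × Int)) (own_id : Int) : Int :=
  match altGolem graph own_id with
  | none => 0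
  | some ld =>
    match PySem.List.pyGet? ld.1 ld.2 with
    | none => 0
    | some start =>
      match dfsB R C forest graph idx_graph (graph.length + 2) own_id start dfsDirsB
          [(start, own_id)] with
      | none => 0
      | some seen =>
        match seen with
        | [] => 0
        | s :: t =>
          match altVal graph s.2 with
          | none => 0
          | some v0 =>
            match altMaxFrom graph v0 t with
            | none => 0
            | some m => m - 2

-- ===== PRECONDITION & SPEC =====
-- a golem entry is usable: ≥ 3 body cells and an escape direction Python's locs[dir] accepts
def pvEntryWF (e : Int × (List (Int × Int)) × Int) : Bool :=
  decide (3 ≤ e.2.1.length) && decide (-(e.2.1.length : Int) ≤ e.2.2) &&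
    decide (e.2.2 < (e.2.1.length : Int))

-- one search step from a usable golem k at cell (tx,ty) cannot raise
def pvStepOK (R C : Int) (forest : List (List Int)) (graph : List (Int × (List (Int × Int)) × Int))
    (idx_graph : List (Int × Int × Int)) (k tx ty : Int) : Bool :=
  if (-1 < tx ∧ tx < R + 3) ∧ (-1 < ty ∧ ty < C) then
    match pvCell forest tx ty with
    | none => false
    | some c =>
      c == 0 || c == 1 || c == k ||
        (match pvILook idx_graph tx ty with
         | none => false
         | some nid => graph.any (fun e2 => e2.1 == nid && pvEntryWF e2))
  else true

def pvEntryOK (R C : Int) (forest : List (List Int)) (graph : List (Int × (List (Int × Int)) × Int))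
    (idx_graph : List (Int × Int × Int)) (e : Int × (List (Int × Int)) × Int) : Bool :=
  if pvEntryWF e then
    match PySem.List.pyGet? e.2.1 e.2.2 with
    | none => true
    | some p =>
      [((-1 : Int), (0 : Int)), (0, 1), (1, 0), (0, -1)].all
        (fun d => pvStepOK R C forest graph idx_graph e.1 (p.1 + d.1) (p.2 + d.2))
  else true

def pvOwnOK (graph : List (Int × (List (Int × Int)) × Int)) (own_id : Int) : Bool :=
  match pvGLook graph own_id with
  | none => false
  | some e => pvEntryWF (own_id, e)

-- usable golems have pairwise distinct escape coordinates (golems occupy distinct cells)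
def pvEscInj (graph : List (Int × (List (Int × Int)) × Int)) : Prop :=
  ∀ e1 ∈ graph, ∀ e2 ∈ graph, pvEntryWF e1 = true → pvEntryWF e2 = true →
    PySem.List.pyGet? e1.2.1 e1.2.2 = PySem.List.pyGet? e2.2.1 e2.2.2 → e1.1 = e2.1

-- Pre_ is the natural well-formedness condition under which the search cannot raise and the
-- discovered set is traversal-order independent: graph's key list is duplicate-free (as a
-- Python dict's is), own_id names a usable golem entry, around every usable golem's escape
-- cell each of the four in-window neighbour cells exists in forest and is 0, 1, the golem
-- itself, or registered in idx_graph with a usable golem id, and usable golems have pairwise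
-- distinct escape cells. It is slightly narrower than "A returns": A also returns when a
-- violation sits in a part of the grid its search never touches (see the cites in claim.json);
-- B returns A's value there too.
def Pre_get_lower_bound (R : Int) (C : Int) (forest : List (List Int)) (graph : List (Int × (List (Int × Int)) × Int)) (idx_graph : List (Int × Int × Int)) (own_id : Int) : Prop :=
  (graph.map (fun e => e.1)).Nodup ∧
  pvOwnOK graph own_id = true ∧
  (∀ e ∈ graph, pvEntryOK R C forest graph idx_graph e = true) ∧
  pvEscInj graph

instance (R : Int) (C : Int) (forest : List (List Int)) (graph : List (Int × (List (Int × Int)) × Int)) (idx_graph : List (Int × Int × Int)) (own_id : Int) : Decidable (Pre_get_lower_bound R C forest graph idx_graph own_id) := by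
  unfold Pre_get_lower_bound pvEscInj; infer_instance

def pvWitness_get_lower_bound : Int × Int × List (List Int) × (List (Int × (List (Int × Int)) × Int)) × (List (Int × Int × Int)) × Int :=
  (-3, 0, [], [(5, ([(0, 0), (0, 1), (1, 0)], 0))], [], 5)

def Spec_get_lower_bound (R : Int) (C : Int) (forest : List (List Int)) (graph : List (Int × (List (Int × Int)) × Int)) (idx_graph : List (Int × Int × Int)) (own_id : Int) (out : Int) : Prop := out = get_lower_bound_alt R C forest graph idx_graph own_id
instance (R : Int) (C : Int) (forest : List (List Int)) (graph : List (Int × (List (Int × Int)) × Int)) (idx_graph : List (Int × Int × Int)) (own_id : Int) (out : Int) : Decidable (Spec_get_lower_bound R C forest graph idx_graph own_id out) := by unfold Spec_get_lower_bound; infer_instance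

-- ===== CLAIM (what is proved, stated in full; the proofs are below) =====
def Claim_equal_get_lower_bound : Prop := ∀ (R : Int) (C : Int) (forest : List (List Int)) (graph : List (Int × (List (Int × Int)) × Int)) (idx_graph : List (Int × Int × Int)) (own_id : Int), Dom_get_lower_bound R C forest graph idx_graph own_id → Pre_get_lower_bound R C forest graph idx_graph own_id → Spec_get_lower_bound R C forest graph idx_graph own_id (get_lower_bound R C forest graph idx_graph own_id)

-- ===== LEMMAS AND PROOFS =====

-- ---- the common abstraction: candidates, reachability, discovered lists ----

-- the candidate produced by one direction (validity checks shared by both programs)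
def pvCandOf (R C : Int) (forest : List (List Int)) (graph : List (Int × (List (Int × Int)) × Int))
    (idx_graph : List (Int × Int × Int)) (n : PvNode) (d : Int × Int) : Option PvNode :=
  if (-1 < n.1.1 + d.1 ∧ n.1.1 + d.1 < R + 3) ∧ (-1 < n.1.2 + d.2 ∧ n.1.2 + d.2 < C) then
    (pvCell forest (n.1.1 + d.1) (n.1.2 + d.2)).bind (fun c =>
      if c = 0 ∨ c = 1 ∨ c = n.2 then none
      else
        (pvILook idx_graph (n.1.1 + d.1) (n.1.2 + d.2)).bind (fun nid =>
          (pvGLook graph nid).bind (fun nb =>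
            (PySem.List.pyGet? nb.1 nb.2).map (fun ncd => (ncd, nid)))))
  else none

def pvDirs4 : List (Int × Int) := [(-1, 0), (0, 1), (1, 0), (0, -1)]

def pvStep (R C : Int) (forest : List (List Int)) (graph : List (Int × (List (Int × Int)) × Int))
    (idx_graph : List (Int × Int × Int)) (n m : PvNode) : Prop :=
  ∃ d ∈ pvDirs4, pvCandOf R C forest graph idx_graph n d = some m

def pvReach (R C : Int) (forest : List (List Int)) (graph : List (Int × (List (Int × Int)) × Int))
    (idx_graph : List (Int × Int × Int)) : PvNode → PvNode → Prop :=
  Relation.ReflTransGen (pvStep R C forest graph idx_graph)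

-- the fresh nodes produced by expanding n over directions ds against known coordinates
def pvNewsK (R C : Int) (forest : List (List Int)) (graph : List (Int × (List (Int × Int)) × Int))
    (idx_graph : List (Int × Int × Int)) (known : List (Int × Int)) (n : PvNode) :
    List (Int × Int) → List PvNode
  | [] => []
  | d :: ds =>
    match pvCandOf R C forest graph idx_graph n d with
    | none => pvNewsK R C forest graph idx_graph known n ds
    | some m =>
      if m.1 ∈ known then pvNewsK R C forest graph idx_graph known n ds
      else m :: pvNewsK R C forest graph idx_graph (known ++ [m.1]) n ds

def pvStepNews (R C : Int) (forest : List (List Int)) (graph : List (Int × (List (Int × Int)) × Int))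
    (idx_graph : List (Int × Int × Int)) (rs : List PvNode) (k : Nat) : List PvNode :=
  match rs[k]? with
  | some n => pvNewsK R C forest graph idx_graph (rs.map (fun it => it.1)) n pvDirs4
  | none => []

def pvAbsLoop (R C : Int) (forest : List (List Int)) (graph : List (Int × (List (Int × Int)) × Int))
    (idx_graph : List (Int × Int × Int)) : Nat → List PvNode → Nat → Option (List PvNode)
  | 0, _, _ => none
  | f + 1, rs, k =>
    if k < rs.length then
      pvAbsLoop R C forest graph idx_graph f (rs ++ pvStepNews R C forest graph idx_graph rs k) (k + 1)
    else some rs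

-- the value a golem id contributes to the maximum
def pvV (graph : List (Int × (List (Int × Int)) × Int)) (g : Int) : Int :=
  match pvGLook graph g with
  | none => 0
  | some e =>
    match PySem.List.pyGet? e.1 2 with
    | none => 0
    | some p => p.1

def pvL (graph : List (Int × (List (Int × Int)) × Int)) : List PvNode → Int
  | [] => 0
  | r :: t => t.foldl (fun a it => max a (pvV graph it.2)) (pvV graph r.2)

def pvClosed (R C : Int) (forest : List (List Int)) (graph : List (Int × (List (Int × Int)) × Int))
    (idx_graph : List (Int × Int × Int)) (rs : List PvNode) (k : Nat) : Prop :=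
  ∀ i, i < k → ∀ n, rs[i]? = some n → ∀ d ∈ pvDirs4, ∀ m,
    pvCandOf R C forest graph idx_graph n d = some m → m.1 ∈ rs.map (fun it => it.1)

def pvWfN (graph : List (Int × (List (Int × Int)) × Int)) (n : PvNode) : Prop :=
  ∃ e, pvGLook graph n.2 = some e ∧ 3 ≤ e.1.length ∧ -(e.1.length : Int) ≤ e.2 ∧
    e.2 < (e.1.length : Int) ∧ PySem.List.pyGet? e.1 e.2 = some n.1

-- ---- basic lookup facts ----
theorem pvGLook_mem {graph : List (Int × (List (Int × Int)) × Int)} {k : Int} {v} :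
    pvGLook graph k = some v → (k, v) ∈ graph := by
  unfold pvGLook
  cases hf : graph.find? (fun e => e.1 == k) with
  | none => simp
  | some e =>
    intro h
    simp at h
    have hm := List.mem_of_find?_eq_some hf
    have hkey := List.find?_some hf
    simp only [beq_iff_eq] at hkey
    subst h
    have : (k, e.2) = e := by cases e; simp_all
    rw [this]; exact hm

theorem pv_get2 {locs : List (Int × Int)} (h : 3 ≤ locs.length) :
    ∃ p, PySem.List.pyGet? locs (2 : Int) = some p := by
  have h2 : (2 : Nat) < locs.length := by omega
  exact ⟨locs[2], by exact_mod_cast PySem.List.pyGet?_ofNat locs 2 h2⟩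

theorem pv_getd {locs : List (Int × Int)} {d : Int}
    (h1 : -(locs.length : Int) ≤ d) (h2 : d < (locs.length : Int)) :
    ∃ p, PySem.List.pyGet? locs d = some p := by
  cases hg : PySem.List.pyGet? locs d with
  | none => exact absurd ⟨h1, h2⟩ ((PySem.List.pyGet?_eq_none_iff locs d).mp hg)
  | some p => exact ⟨p, rfl⟩

-- ---- consequences of Pre_ ----
theorem pvGLook_of_mem_nodup {graph : List (Int × (List (Int × Int)) × Int)} {k : Int} {v}
    (hnd : (graph.map (fun e => e.1)).Nodup) (hm : (k, v) ∈ graph) :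
    pvGLook graph k = some v := by
  induction graph with
  | nil => simp at hm
  | cons e t ih =>
    rw [List.map_cons, List.nodup_cons] at hnd
    rcases List.mem_cons.mp hm with h | h
    · subst h
      unfold pvGLook
      rw [List.find?_cons_of_pos (by simp)]
      rfl
    · have hne : e.1 ≠ k := by
        intro hcon
        exact hnd.1 (by rw [hcon]; exact List.mem_map.mpr ⟨(k, v), h, rfl⟩)
      unfold pvGLook
      rw [List.find?_cons_of_neg (by simpa using hne)]
      exact ih hnd.2 h

theorem pre_chain {R C : Int} {forest : List (List Int)} {graph : List (Int × (List (Int × Int)) × Int)} {idx_graph : List (Int × Int × Int)} {own_id : Int}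
    (hPre : Pre_get_lower_bound R C forest graph idx_graph own_id)
    {n : PvNode} (hn : pvWfN graph n) {d : Int × Int} (hd : d ∈ pvDirs4)
    (hb : (-1 < n.1.1 + d.1 ∧ n.1.1 + d.1 < R + 3) ∧ (-1 < n.1.2 + d.2 ∧ n.1.2 + d.2 < C)) :
    ∃ c, pvCell forest (n.1.1 + d.1) (n.1.2 + d.2) = some c ∧
      (¬ (c = 0 ∨ c = 1 ∨ c = n.2) →
        ∃ nid nb, pvILook idx_graph (n.1.1 + d.1) (n.1.2 + d.2) = some nid ∧
          pvGLook graph nid = some nb ∧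
          3 ≤ nb.1.length ∧ -(nb.1.length : Int) ≤ nb.2 ∧ nb.2 < (nb.1.length : Int) ∧
          (∃ p, PySem.List.pyGet? nb.1 nb.2 = some p) ∧
          (∃ q, PySem.List.pyGet? nb.1 2 = some q)) := by
  obtain ⟨hndG, _, hall, _⟩ := hPre
  obtain ⟨e, hG, h3, hlo, hhi, hesc⟩ := hn
  have hok := hall (n.2, e) (pvGLook_mem hG)
  unfold pvEntryOK at hok
  have hwfE : pvEntryWF (n.2, e) = true := by
    unfold pvEntryWF
    simp only [Bool.and_eq_true, decide_eq_true_eq]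
    exact ⟨⟨h3, hlo⟩, hhi⟩
  rw [if_pos hwfE] at hok
  have hesc' : PySem.List.pyGet? (n.2, e).2.1 (n.2, e).2.2 = some n.1 := hesc
  rw [hesc'] at hok
  have hstep := (List.all_eq_true.mp hok) d (by
    revert hd; unfold pvDirs4; intro hd; exact hd)
  unfold pvStepOK at hstep
  rw [if_pos hb] at hstep
  dsimp only at hstep
  cases hc : pvCell forest (n.1.1 + d.1) (n.1.2 + d.2) with
  | none => rw [hc] at hstep; simp at hstep
  | some c =>
    rw [hc] at hstep
    dsimp only at hstep
    refine ⟨c, rfl, fun hne => ?_⟩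
    simp only [not_or] at hne
    have h0 : (c == 0) = false := by simpa using hne.1
    have h1 : (c == 1) = false := by simpa using hne.2.1
    have h2 : (c == n.2) = false := by simpa using hne.2.2
    rw [h0, h1, h2, Bool.false_or, Bool.false_or, Bool.false_or] at hstep
    cases hi : pvILook idx_graph (n.1.1 + d.1) (n.1.2 + d.2) with
    | none => rw [hi] at hstep; simp at hstep
    | some nid =>
      rw [hi] at hstep
      dsimp only at hstep
      obtain ⟨e2, he2, hprop⟩ := List.any_eq_true.mp hstep
      rw [Bool.and_eq_true] at hprop
      have hkey : e2.1 = nid := by simpa using hprop.1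
      have hwf2 : pvEntryWF e2 = true := hprop.2
      unfold pvEntryWF at hwf2
      simp only [Bool.and_eq_true, decide_eq_true_eq] at hwf2
      have hlook : pvGLook graph nid = some e2.2 := by
        have : (nid, e2.2) ∈ graph := by
          rw [← hkey]
          exact (by cases e2; simpa using he2)
        exact pvGLook_of_mem_nodup hndG this
      obtain ⟨p, hp⟩ := pv_getd hwf2.1.2 hwf2.2
      obtain ⟨q, hq⟩ := pv_get2 hwf2.1.1
      exact ⟨nid, e2.2, rfl, hlook, hwf2.1.1, hwf2.1.2, hwf2.2, ⟨p, hp⟩, ⟨q, hq⟩⟩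

theorem pre_cand_wf {R C : Int} {forest : List (List Int)} {graph : List (Int × (List (Int × Int)) × Int)} {idx_graph : List (Int × Int × Int)} {own_id : Int}
    (hPre : Pre_get_lower_bound R C forest graph idx_graph own_id)
    {n : PvNode} (hn : pvWfN graph n) {d : Int × Int} (hd : d ∈ pvDirs4)
    {m : PvNode} (h : pvCandOf R C forest graph idx_graph n d = some m) : pvWfN graph m := by
  unfold pvCandOf at h
  split at h
  · rename_i hb
    obtain ⟨c, hc, hchain⟩ := pre_chain hPre hn hd hb
    rw [hc, Option.bind_some] at h
    split at h
    · simp at h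
    · rename_i hskip
      obtain ⟨nid, nb, hi, hg, h3, hlo, hhi, ⟨p, hp⟩, _⟩ := hchain hskip
      rw [hi, Option.bind_some, hg, Option.bind_some, hp, Option.map_some] at h
      cases h
      exact ⟨nb, hg, h3, hlo, hhi, hp⟩
  · simp at h

-- two well-formed nodes with the same escape coordinate are the same node (from pvEscInj)
theorem pv_wf_inj {graph : List (Int × (List (Int × Int)) × Int)}
    (hinj : pvEscInj graph) {n m : PvNode}
    (hn : pvWfN graph n) (hm : pvWfN graph m) (h : n.1 = m.1) : n = m := by
  obtain ⟨e, hG, h3, hlo, hhi, hesc⟩ := hn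
  obtain ⟨e', hG', h3', hlo', hhi', hesc'⟩ := hm
  have hwf1 : pvEntryWF (n.2, e) = true := by
    unfold pvEntryWF; simp only [Bool.and_eq_true, decide_eq_true_eq]; exact ⟨⟨h3, hlo⟩, hhi⟩
  have hwf2 : pvEntryWF (m.2, e') = true := by
    unfold pvEntryWF; simp only [Bool.and_eq_true, decide_eq_true_eq]; exact ⟨⟨h3', hlo'⟩, hhi'⟩
  have hkeys := hinj (n.2, e) (pvGLook_mem hG) (m.2, e') (pvGLook_mem hG') hwf1 hwf2 (by
    show PySem.List.pyGet? e.1 e.2 = PySem.List.pyGet? e'.1 e'.2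
    rw [hesc, hesc', h])
  have : n.2 = m.2 := hkeys
  cases n; cases m; simp_all

-- ---- properties of pvNewsK ----
theorem pv_if_max (a b : Int) : (if a < b then b else a) = max a b := by
  rcases le_or_gt b a with h | h
  · rw [if_neg (by omega)]; omega
  · rw [if_pos h]; omega

theorem pvNewsK_cons_none {R C : Int} {forest : List (List Int)} {graph : List (Int × (List (Int × Int)) × Int)} {idx_graph : List (Int × Int × Int)} {n : PvNode} {d : Int × Int}
    {known : List (Int × Int)} {ds : List (Int × Int)}
    (h : pvCandOf R C forest graph idx_graph n d = none) :
    pvNewsK R C forest graph idx_graph known n (d :: ds) =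
      pvNewsK R C forest graph idx_graph known n ds := by
  conv_lhs => rw [pvNewsK]
  rw [h]

theorem pvNewsK_cons_mem {R C : Int} {forest : List (List Int)} {graph : List (Int × (List (Int × Int)) × Int)} {idx_graph : List (Int × Int × Int)} {n : PvNode} {d : Int × Int}
    {known : List (Int × Int)} {ds : List (Int × Int)} {m : PvNode}
    (h : pvCandOf R C forest graph idx_graph n d = some m) (hm : m.1 ∈ known) :
    pvNewsK R C forest graph idx_graph known n (d :: ds) =
      pvNewsK R C forest graph idx_graph known n ds := by
  conv_lhs => rw [pvNewsK]
  rw [h]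
  exact if_pos hm

theorem pvNewsK_cons_new {R C : Int} {forest : List (List Int)} {graph : List (Int × (List (Int × Int)) × Int)} {idx_graph : List (Int × Int × Int)} {n : PvNode} {d : Int × Int}
    {known : List (Int × Int)} {ds : List (Int × Int)} {m : PvNode}
    (h : pvCandOf R C forest graph idx_graph n d = some m) (hm : m.1 ∉ known) :
    pvNewsK R C forest graph idx_graph known n (d :: ds) =
      m :: pvNewsK R C forest graph idx_graph (known ++ [m.1]) n ds := by
  conv_lhs => rw [pvNewsK]
  rw [h]
  exact if_neg hm

theorem pvNewsK_nodup {R C : Int} {forest : List (List Int)} {graph : List (Int × (List (Int × Int)) × Int)} {idx_graph : List (Int × Int × Int)} {n : PvNode} :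
    ∀ (ds : List (Int × Int)) (known : List (Int × Int)), known.Nodup →
      (known ++ (pvNewsK R C forest graph idx_graph known n ds).map (fun m => m.1)).Nodup := by
  intro ds
  induction ds with
  | nil => intro known h; simpa [pvNewsK] using h
  | cons d ds ih =>
    intro known hk
    cases hc : pvCandOf R C forest graph idx_graph n d with
    | none => rw [pvNewsK_cons_none hc]; exact ih known hk
    | some m0 =>
      by_cases hmem : m0.1 ∈ known
      · rw [pvNewsK_cons_mem hc hmem]; exact ih known hk
      · rw [pvNewsK_cons_new hc hmem]
        have hnd : (known ++ [m0.1]).Nodup := by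
          rw [List.nodup_append]
          refine ⟨hk, List.nodup_singleton _, ?_⟩
          intro a ha b hb
          rcases List.mem_singleton.mp hb with rfl
          intro hab; subst hab; exact hmem ha
        have h2 := ih (known ++ [m0.1]) hnd
        simpa [List.append_assoc] using h2

theorem pvNewsK_complete {R C : Int} {forest : List (List Int)} {graph : List (Int × (List (Int × Int)) × Int)} {idx_graph : List (Int × Int × Int)} {n : PvNode} :
    ∀ (ds : List (Int × Int)) (known : List (Int × Int)),
      ∀ d ∈ ds, ∀ m, pvCandOf R C forest graph idx_graph n d = some m →
        m.1 ∈ known ++ (pvNewsK R C forest graph idx_graph known n ds).map (fun m => m.1) := by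
  intro ds
  induction ds with
  | nil => intro known d hd; simp at hd
  | cons d0 ds ih =>
    intro known d hd m hm
    rcases List.mem_cons.mp hd with h | h
    · subst h
      by_cases hmem : m.1 ∈ known
      · exact List.mem_append_left _ hmem
      · rw [pvNewsK_cons_new hm hmem]
        simp
    · cases hc : pvCandOf R C forest graph idx_graph n d0 with
      | none => rw [pvNewsK_cons_none hc]; exact ih known d h m hm
      | some m0 =>
        by_cases hmem : m0.1 ∈ known
        · rw [pvNewsK_cons_mem hc hmem]; exact ih known d h m hm
        · rw [pvNewsK_cons_new hc hmem]
          have h2 := ih (known ++ [m0.1]) d h m hm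
          simpa [List.append_assoc] using h2

theorem pvNewsK_wf {R C : Int} {forest : List (List Int)} {graph : List (Int × (List (Int × Int)) × Int)} {idx_graph : List (Int × Int × Int)} {own_id : Int}
    (hPre : Pre_get_lower_bound R C forest graph idx_graph own_id) {n : PvNode}
    (hn : pvWfN graph n) :
    ∀ (ds : List (Int × Int)), (∀ d ∈ ds, d ∈ pvDirs4) → ∀ (known : List (Int × Int)),
      ∀ m ∈ pvNewsK R C forest graph idx_graph known n ds, pvWfN graph m := by
  intro ds
  induction ds with
  | nil => intro _ known m hm; simp [pvNewsK] at hm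
  | cons d ds ih =>
    intro hds known m hm
    cases hc : pvCandOf R C forest graph idx_graph n d with
    | none =>
      rw [pvNewsK_cons_none hc] at hm
      exact ih (fun d hd => hds d (List.mem_cons_of_mem _ hd)) known m hm
    | some m0 =>
      by_cases hmem : m0.1 ∈ known
      · rw [pvNewsK_cons_mem hc hmem] at hm
        exact ih (fun d hd => hds d (List.mem_cons_of_mem _ hd)) known m hm
      · rw [pvNewsK_cons_new hc hmem] at hm
        rcases List.mem_cons.mp hm with h | h
        · subst h; exact pre_cand_wf hPre hn (hds d List.mem_cons_self) hc
        · exact ih (fun d hd => hds d (List.mem_cons_of_mem _ hd)) (known ++ [m0.1]) m h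

theorem pvNewsK_sub {R C : Int} {forest : List (List Int)} {graph : List (Int × (List (Int × Int)) × Int)} {idx_graph : List (Int × Int × Int)} {n : PvNode} :
    ∀ (ds : List (Int × Int)) (known : List (Int × Int)),
      ∀ m ∈ pvNewsK R C forest graph idx_graph known n ds,
        ∃ d ∈ ds, pvCandOf R C forest graph idx_graph n d = some m := by
  intro ds
  induction ds with
  | nil => intro known m hm; simp [pvNewsK] at hm
  | cons d ds ih =>
    intro known m hm
    cases hc : pvCandOf R C forest graph idx_graph n d with
    | none =>
      rw [pvNewsK_cons_none hc] at hm
      obtain ⟨d', hd', h'⟩ := ih known m hm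
      exact ⟨d', List.mem_cons_of_mem _ hd', h'⟩
    | some m0 =>
      by_cases hmem : m0.1 ∈ known
      · rw [pvNewsK_cons_mem hc hmem] at hm
        obtain ⟨d', hd', h'⟩ := ih known m hm
        exact ⟨d', List.mem_cons_of_mem _ hd', h'⟩
      · rw [pvNewsK_cons_new hc hmem] at hm
        rcases List.mem_cons.mp hm with h | h
        · subst h; exact ⟨d, List.mem_cons_self, hc⟩
        · obtain ⟨d', hd', h'⟩ := ih (known ++ [m0.1]) m h
          exact ⟨d', List.mem_cons_of_mem _ hd', h'⟩

-- ---- the A-side expansion over a direction list is pvNewsK ----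
theorem bfs_expand_eq {R C : Int} {forest : List (List Int)} {graph : List (Int × (List (Int × Int)) × Int)} {idx_graph : List (Int × Int × Int)} {own_id : Int}
    (hPre : Pre_get_lower_bound R C forest graph idx_graph own_id) (n : PvNode)
    (hn : pvWfN graph n) :
    ∀ (ds : List (Int × Int)), (∀ d ∈ ds, d ∈ pvDirs4) →
      ∀ (q : List PvNode) (vis : List (Int × Int)) (low : Int),
      ds.foldl (bfsStep R C forest graph idx_graph n) (some (q, vis, low)) =
        some (q ++ pvNewsK R C forest graph idx_graph vis n ds,
              vis ++ (pvNewsK R C forest graph idx_graph vis n ds).map (fun m => m.1),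
              (pvNewsK R C forest graph idx_graph vis n ds).foldl
                (fun a m => max a (pvV graph m.2)) low) := by
  intro ds
  induction ds with
  | nil => intro _ q vis low; simp [pvNewsK]
  | cons d ds ih =>
    intro hds q vis low
    have ihds := fun d hd => hds d (List.mem_cons_of_mem _ hd)
    rw [List.foldl_cons]
    by_cases hb : (-1 < n.1.1 + d.1 ∧ n.1.1 + d.1 < R + 3) ∧ (-1 < n.1.2 + d.2 ∧ n.1.2 + d.2 < C)
    · obtain ⟨c, hc, hchain⟩ := pre_chain hPre hn (hds d List.mem_cons_self) hb
      by_cases hskip : c = 0 ∨ c = 1 ∨ c = n.2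
      · have hstep : bfsStep R C forest graph idx_graph n (some (q, vis, low)) d = some (q, vis, low) := by
          simp only [bfsStep, Option.bind_some]
          rw [hc, if_pos hb]
          exact if_pos hskip
        have hcand : pvCandOf R C forest graph idx_graph n d = none := by
          unfold pvCandOf
          rw [if_pos hb, hc, Option.bind_some]
          exact if_pos hskip
        rw [hstep, pvNewsK_cons_none hcand]
        exact ih ihds q vis low
      · obtain ⟨nid, nb, hi, hg, _, _, _, ⟨p, hp⟩, ⟨l2, hl2⟩⟩ := hchain hskip
        have hcand : pvCandOf R C forest graph idx_graph n d = some (p, nid) := by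
          unfold pvCandOf
          rw [if_pos hb, hc, Option.bind_some, if_neg hskip, hi, Option.bind_some, hg,
            Option.bind_some, hp, Option.map_some]
        have hV : pvV graph nid = l2.1 := by
          unfold pvV; simp [hg, hl2]
        by_cases hv : p ∈ vis
        · have hcont : PySem.Set.contains vis p = true := (PySem.Set.contains_iff vis p).mpr hv
          have hstep : bfsStep R C forest graph idx_graph n (some (q, vis, low)) d = some (q, vis, low) := by
            simp only [bfsStep, Option.bind_some]
            rw [if_pos hb, hc]
            simp [hskip, hi, hg, hp, hv]
          rw [hstep, pvNewsK_cons_mem hcand hv]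
          exact ih ihds q vis low
        · have hcont : PySem.Set.contains vis p = false := by
            rw [← Bool.not_eq_true]; intro hcc
            exact hv ((PySem.Set.contains_iff vis p).mp hcc)
          have hadd : PySem.Set.add vis p = vis ++ [p] := by
            unfold PySem.Set.add; rw [hcont]; simp
          have hstep : bfsStep R C forest graph idx_graph n (some (q, vis, low)) d =
              some (q ++ [(p, nid)], vis ++ [p], if low < l2.1 then l2.1 else low) := by
            simp only [bfsStep, Option.bind_some]
            rw [if_pos hb, hc]
            simp [hskip, hi, hg, hp, hl2, hv]
          rw [hstep, pvNewsK_cons_new hcand hv]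
          rw [ih ihds (q ++ [(p, nid)]) (vis ++ [p]) (if low < l2.1 then l2.1 else low)]
          simp only [List.append_assoc, List.singleton_append, List.map_cons, List.foldl_cons]
          rw [pv_if_max, hV]
    · have hstep : bfsStep R C forest graph idx_graph n (some (q, vis, low)) d = some (q, vis, low) := by
        simp only [bfsStep, Option.bind_some]
        exact if_neg hb
      have hcand : pvCandOf R C forest graph idx_graph n d = none := by
        unfold pvCandOf; exact if_neg hb
      rw [hstep, pvNewsK_cons_none hcand]
      exact ih ihds q vis low

-- ---- the BFS loop is the abstract discovery loop ----
theorem pvL_append {graph : List (Int × (List (Int × Int)) × Int)} {rs ns : List PvNode}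
    (h : rs ≠ []) :
    pvL graph (rs ++ ns) = ns.foldl (fun a m => max a (pvV graph m.2)) (pvL graph rs) := by
  cases rs with
  | nil => exact absurd rfl h
  | cons r t =>
    show pvL graph (r :: (t ++ ns)) = _
    simp [pvL, List.foldl_append]

theorem bfs_abs {R C : Int} {forest : List (List Int)} {graph : List (Int × (List (Int × Int)) × Int)} {idx_graph : List (Int × Int × Int)} {own_id : Int}
    (hPre : Pre_get_lower_bound R C forest graph idx_graph own_id) :
    ∀ (fuel : Nat) (rs : List PvNode) (k : Nat), k ≤ rs.length → rs ≠ [] →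
      (∀ n ∈ rs, pvWfN graph n) →
      bfsLoop R C forest graph idx_graph fuel (rs.drop k) (rs.map (fun it => it.1)) (pvL graph rs) =
        (pvAbsLoop R C forest graph idx_graph fuel rs k).map (fun r => pvL graph r - 2) := by
  intro fuel
  induction fuel with
  | zero => intro rs k _ _ _; rfl
  | succ f ih =>
    intro rs k hk hne hwfrs
    by_cases hlt : k < rs.length
    · have hdrop : rs.drop k = rs[k] :: rs.drop (k + 1) := List.drop_eq_getElem_cons hlt
      have hexp := bfs_expand_eq hPre rs[k] (hwfrs rs[k] (List.getElem_mem hlt)) pvDirs4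
        (fun d hd => hd) (rs.drop (k + 1)) (rs.map (fun it => it.1)) (pvL graph rs)
      have hdirs : pvDirs.dropLast = pvDirs4 := rfl
      have hns : pvNewsK R C forest graph idx_graph (rs.map (fun it => it.1)) rs[k] pvDirs4 =
          pvStepNews R C forest graph idx_graph rs k := by
        unfold pvStepNews
        rw [List.getElem?_eq_getElem hlt]
      have h1 : rs.drop (k + 1) ++ pvStepNews R C forest graph idx_graph rs k =
          (rs ++ pvStepNews R C forest graph idx_graph rs k).drop (k + 1) := by
        rw [List.drop_append_of_le_length (by omega)]
      have h2 : rs.map (fun it => it.1) ++ (pvStepNews R C forest graph idx_graph rs k).map (fun it => it.1) =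
          (rs ++ pvStepNews R C forest graph idx_graph rs k).map (fun it => it.1) := by
        rw [List.map_append]
      have h3 : (pvStepNews R C forest graph idx_graph rs k).foldl
            (fun a m => max a (pvV graph m.2)) (pvL graph rs) =
          pvL graph (rs ++ pvStepNews R C forest graph idx_graph rs k) := by
        rw [pvL_append hne]
      have hexp2 : bfsExpand R C forest graph idx_graph rs[k] (rs.drop (k + 1))
            (rs.map (fun it => it.1)) (pvL graph rs) =
          some ((rs ++ pvStepNews R C forest graph idx_graph rs k).drop (k + 1),
                (rs ++ pvStepNews R C forest graph idx_graph rs k).map (fun it => it.1),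
                pvL graph (rs ++ pvStepNews R C forest graph idx_graph rs k)) := by
        unfold bfsExpand
        rw [hdirs, hexp, hns, h1, h2, h3]
      have hstep : bfsLoop R C forest graph idx_graph (f + 1) (rs[k] :: rs.drop (k + 1))
            (rs.map (fun it => it.1)) (pvL graph rs) =
          bfsLoop R C forest graph idx_graph f
            ((rs ++ pvStepNews R C forest graph idx_graph rs k).drop (k + 1))
            ((rs ++ pvStepNews R C forest graph idx_graph rs k).map (fun it => it.1))
            (pvL graph (rs ++ pvStepNews R C forest graph idx_graph rs k)) := by
        simp only [bfsLoop, hexp2]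
      rw [hdrop, hstep]
      rw [ih (rs ++ pvStepNews R C forest graph idx_graph rs k) (k + 1)
        (by rw [List.length_append]; omega) (by simp [hne])
        (by
          intro n hn
          rcases List.mem_append.mp hn with h | h
          · exact hwfrs n h
          · rw [← hns] at h
            exact pvNewsK_wf hPre (hwfrs rs[k] (List.getElem_mem hlt)) pvDirs4
              (fun d hd => hd) _ n h)]
      have habs : pvAbsLoop R C forest graph idx_graph (f + 1) rs k =
          pvAbsLoop R C forest graph idx_graph f (rs ++ pvStepNews R C forest graph idx_graph rs k) (k + 1) := by
        conv_lhs => rw [pvAbsLoop]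
        rw [if_pos hlt]
      rw [habs]
    · have hk' : k = rs.length := by omega
      have hdrop : rs.drop k = [] := by rw [hk']; simp
      have habs : pvAbsLoop R C forest graph idx_graph (f + 1) rs k = some rs := by
        conv_lhs => rw [pvAbsLoop]
        rw [if_neg hlt]
      rw [hdrop, habs]
      rfl

theorem pvAbsLoop_prefix {R C : Int} {forest : List (List Int)} {graph : List (Int × (List (Int × Int)) × Int)} {idx_graph : List (Int × Int × Int)} :
    ∀ (f : Nat) (rs : List PvNode) (k : Nat) (r : List PvNode),
      pvAbsLoop R C forest graph idx_graph f rs k = some r → rs <+: r := by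
  intro f
  induction f with
  | zero => intro rs k r h; exact absurd h (by simp [pvAbsLoop])
  | succ f ih =>
    intro rs k r h
    rw [pvAbsLoop] at h
    by_cases hlt : k < rs.length
    · rw [if_pos hlt] at h
      have := ih _ _ _ h
      exact (List.prefix_append rs _).trans this
    · rw [if_neg hlt] at h
      cases h
      exact List.prefix_refl _

theorem pvClosed_append {R C : Int} {forest : List (List Int)} {graph : List (Int × (List (Int × Int)) × Int)} {idx_graph : List (Int × Int × Int)}
    {rs ext : List PvNode} {k : Nat} (hk : k ≤ rs.length)
    (h : pvClosed R C forest graph idx_graph rs k) :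
    pvClosed R C forest graph idx_graph (rs ++ ext) k := by
  intro i hi n hget d hd m hm
  have hi' : i < rs.length := by omega
  rw [List.getElem?_append_left hi'] at hget
  have := h i hi n hget d hd m hm
  rw [List.map_append]
  exact List.mem_append_left _ this

-- ---- a counting bound: distinct escape coordinates are bounded by the graph size ----
theorem pv_card {graph : List (Int × (List (Int × Int)) × Int)} {rs : List PvNode}
    (hnd : (rs.map (fun it => it.1)).Nodup) (hwf : ∀ n ∈ rs, pvWfN graph n) :
    rs.length ≤ graph.length := by
  set E := graph.filterMap (fun e => PySem.List.pyGet? e.2.1 e.2.2) with hE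
  have hsub : ∀ x ∈ rs.map (fun it => it.1), x ∈ E := by
    intro x hx
    obtain ⟨n, hn, hx⟩ := List.mem_map.mp hx
    obtain ⟨e, hG, _, _, _, hget⟩ := hwf n hn
    rw [hE, List.mem_filterMap]
    refine ⟨(n.2, e), pvGLook_mem hG, ?_⟩
    show PySem.List.pyGet? e.1 e.2 = some x
    rw [← hx]; exact hget
  have h1 : (rs.map (fun it => it.1)).toFinset.card = rs.length := by
    rw [List.toFinset_card_of_nodup hnd, List.length_map]
  have h2 : (rs.map (fun it => it.1)).toFinset ⊆ E.toFinset := by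
    intro x hx
    rw [List.mem_toFinset] at hx ⊢
    exact hsub x hx
  have h3 := Finset.card_le_card h2
  have h4 : E.toFinset.card ≤ E.length := E.toFinset_card_le
  have h5 : E.length ≤ graph.length := List.length_filterMap_le _ _
  omega

-- ---- the abstract loop terminates, stays well formed, closed and reachable ----
theorem pvAbsLoop_good {R C : Int} {forest : List (List Int)} {graph : List (Int × (List (Int × Int)) × Int)} {idx_graph : List (Int × Int × Int)} {own_id : Int}
    (hPre : Pre_get_lower_bound R C forest graph idx_graph own_id) (s : PvNode) :
    ∀ (f : Nat) (rs : List PvNode) (k : Nat),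
      (rs.map (fun it => it.1)).Nodup → (∀ n ∈ rs, pvWfN graph n) →
      pvClosed R C forest graph idx_graph rs k →
      (∀ n ∈ rs, pvReach R C forest graph idx_graph s n) →
      k ≤ rs.length → graph.length + 1 ≤ f + k →
      ∃ r, pvAbsLoop R C forest graph idx_graph f rs k = some r ∧
        (r.map (fun it => it.1)).Nodup ∧ (∀ n ∈ r, pvWfN graph n) ∧
        pvClosed R C forest graph idx_graph r r.length ∧
        (∀ n ∈ r, pvReach R C forest graph idx_graph s n) := by
  intro f
  induction f with
  | zero =>
    intro rs k hnd hwf _ _ hk hb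
    have := pv_card hnd hwf
    omega
  | succ f ih =>
    intro rs k hnd hwf hcl hreach hk hb
    by_cases hlt : k < rs.length
    · have hnews : pvStepNews R C forest graph idx_graph rs k =
          pvNewsK R C forest graph idx_graph (rs.map (fun it => it.1)) rs[k] pvDirs4 := by
        unfold pvStepNews
        rw [List.getElem?_eq_getElem hlt]
      have hnd' : ((rs ++ pvStepNews R C forest graph idx_graph rs k).map (fun it => it.1)).Nodup := by
        rw [hnews, List.map_append]
        exact pvNewsK_nodup pvDirs4 _ hnd
      have hwf' : ∀ n ∈ rs ++ pvStepNews R C forest graph idx_graph rs k, pvWfN graph n := by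
        intro n hn
        rcases List.mem_append.mp hn with h | h
        · exact hwf n h
        · rw [hnews] at h
          exact pvNewsK_wf hPre (hwf rs[k] (List.getElem_mem hlt)) pvDirs4
            (fun d hd => hd) _ n h
      have hcl' : pvClosed R C forest graph idx_graph
          (rs ++ pvStepNews R C forest graph idx_graph rs k) (k + 1) := by
        intro i hi n hget d hd m hm
        by_cases hik : i < k
        · exact pvClosed_append (le_of_lt hlt) hcl i hik n hget d hd m hm
        · have hik' : i = k := by omega
          subst hik'
          rw [List.getElem?_append_left hlt, List.getElem?_eq_getElem hlt] at hget
          cases hget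
          have := pvNewsK_complete pvDirs4 (rs.map (fun it => it.1)) d hd m hm
          rw [hnews, List.map_append]
          exact this
      have hreach' : ∀ n ∈ rs ++ pvStepNews R C forest graph idx_graph rs k,
          pvReach R C forest graph idx_graph s n := by
        intro n hn
        rcases List.mem_append.mp hn with h | h
        · exact hreach n h
        · rw [hnews] at h
          obtain ⟨d, hd, hc⟩ := pvNewsK_sub pvDirs4 _ n h
          exact Relation.ReflTransGen.tail (hreach rs[k] (List.getElem_mem hlt)) ⟨d, hd, hc⟩
      obtain ⟨r, hr, hrnd, hrwf, hrcl, hrre⟩ := ih (rs ++ pvStepNews R C forest graph idx_graph rs k)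
        (k + 1) hnd' hwf' hcl' hreach' (by rw [List.length_append]; omega) (by omega)
      refine ⟨r, ?_, hrnd, hrwf, hrcl, hrre⟩
      conv_lhs => rw [pvAbsLoop]
      rw [if_pos hlt]
      exact hr
    · have hk' : k = rs.length := by omega
      refine ⟨rs, ?_, hnd, hwf, by rw [← hk']; exact hcl, hreach⟩
      conv_lhs => rw [pvAbsLoop]
      rw [if_neg hlt]

theorem closed_all_of_pvClosed {R C : Int} {forest : List (List Int)} {graph : List (Int × (List (Int × Int)) × Int)} {idx_graph : List (Int × Int × Int)}
    {rs : List PvNode} (h : pvClosed R C forest graph idx_graph rs rs.length) :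
    ∀ n ∈ rs, ∀ d ∈ pvDirs4, ∀ m, pvCandOf R C forest graph idx_graph n d = some m →
      m.1 ∈ rs.map (fun it => it.1) := by
  intro n hn
  obtain ⟨i, hi, hget⟩ := List.getElem_of_mem hn
  exact h i hi n (by rw [List.getElem?_eq_getElem hi, hget])

-- ---- B-side helper lookups agree with the A-side ones ----
theorem altGolem_eq (graph : List (Int × (List (Int × Int)) × Int)) (k : Int) :
    altGolem graph k = pvGLook graph k := by
  induction graph with
  | nil => simp [altGolem, pvGLook]
  | cons e t ih =>
    by_cases h : e.1 = k
    · simp [altGolem, pvGLook, List.find?_cons_of_pos, h]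
    · rw [show altGolem (e :: t) k = altGolem t k from by simp [altGolem, h]]
      unfold pvGLook
      rw [List.find?_cons_of_neg (by simpa using h)]
      exact ih

theorem altIdx_eq (ig : List (Int × Int × Int)) (x y : Int) :
    altIdx ig x y = pvILook ig x y := by
  induction ig with
  | nil => simp [altIdx, pvILook]
  | cons e t ih =>
    by_cases h : e.1 = x ∧ e.2.1 = y
    · simp [altIdx, pvILook, List.find?_cons_of_pos, h]
    · rw [show altIdx (e :: t) x y = altIdx t x y from by simp [altIdx, h]]
      unfold pvILook
      rw [List.find?_cons_of_neg (by
        simp only [Bool.and_eq_true, beq_iff_eq]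
        exact fun hc => h ⟨hc.1, hc.2⟩)]
      exact ih

theorem altRow_natCast {α : Type} : ∀ (l : List α) (n : Nat), altRow l (n : Int) = l[n]? := by
  intro l
  induction l with
  | nil => intro n; simp [altRow]
  | cons a t ih =>
    intro n
    cases n with
    | zero => simp [altRow]
    | succ m =>
      simp only [altRow]
      rw [if_neg (by omega), if_pos (by omega)]
      rw [show ((m + 1 : Nat) : Int) - 1 = ((m : Nat) : Int) from by push_cast; ring]
      rw [ih m]
      simp

theorem altRow_eq_pyGet {α : Type} (l : List α) (i : Int) (h : 0 ≤ i) :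
    altRow l i = PySem.List.pyGet? l i := by
  obtain ⟨n, rfl⟩ := Int.eq_ofNat_of_zero_le h
  rw [altRow_natCast, PySem.List.pyGet?_natCast]

-- ---- prefix helper ----
theorem prefix_map_mem {l1 l2 : List PvNode} (h : l1 <+: l2) {x : Int × Int}
    (hx : x ∈ l1.map (fun it => it.1)) : x ∈ l2.map (fun it => it.1) :=
  (h.map (fun it => it.1)).subset hx

-- ---- the DFS of B: totality plus its discovery invariants ----
theorem dfs_spec {R C : Int} {forest : List (List Int)} {graph : List (Int × (List (Int × Int)) × Int)} {idx_graph : List (Int × Int × Int)} {own_id : Int}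
    (hPre : Pre_get_lower_bound R C forest graph idx_graph own_id) :
    ∀ (fuel : Nat) (ds : List (Int × Int)) (gid : Int) (pos : Int × Int) (seen : List PvNode),
      (∀ d ∈ ds, d ∈ pvDirs4) →
      pvWfN graph (pos, gid) →
      (seen.map (fun it => it.1)).Nodup →
      (∀ n ∈ seen, pvWfN graph n) →
      graph.length + 1 ≤ fuel + seen.length →
      ∃ out, dfsB R C forest graph idx_graph fuel gid pos ds seen = some out ∧
        seen <+: out ∧
        (out.map (fun it => it.1)).Nodup ∧
        (∀ n ∈ out, pvWfN graph n) ∧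
        (∀ n ∈ out, n ∈ seen ∨ pvReach R C forest graph idx_graph (pos, gid) n) ∧
        (∀ d ∈ ds, ∀ m, pvCandOf R C forest graph idx_graph (pos, gid) d = some m →
          m.1 ∈ out.map (fun it => it.1)) ∧
        (∀ n ∈ out, n ∉ seen → ∀ d ∈ pvDirs4, ∀ m,
          pvCandOf R C forest graph idx_graph n d = some m →
          m.1 ∈ out.map (fun it => it.1)) := by
  intro fuel
  induction fuel with
  | zero =>
    intro ds gid pos seen _ _ hnd hwfs hb
    exfalso
    have := pv_card hnd hwfs
    omega
  | succ f ihf =>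
    intro ds gid pos
    induction ds with
    | nil =>
      intro seen hds hwfp hnd hwfs hb
      refine ⟨seen, by simp [dfsB], List.prefix_refl _, hnd, hwfs, fun n hn => Or.inl hn, ?_, ?_⟩
      · intro d hd; simp at hd
      · intro n hn hns; exact absurd hn hns
    | cons d ds ihds =>
      intro seen hds hwfp hnd hwfs hb
      have hds' : ∀ d' ∈ ds, d' ∈ pvDirs4 := fun d' hd' => hds d' (List.mem_cons_of_mem _ hd')
      have hdmem : d ∈ pvDirs4 := hds d List.mem_cons_self
      by_cases hbA : ((-1 < pos.1 + d.1 ∧ pos.1 + d.1 < R + 3) ∧ (-1 < pos.2 + d.2 ∧ pos.2 + d.2 < C))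
      · have hwin : (0 ≤ pos.1 + d.1 ∧ pos.1 + d.1 < R + 3 ∧ 0 ≤ pos.2 + d.2 ∧ pos.2 + d.2 < C) := by
          omega
        obtain ⟨c, hc, hchain⟩ := pre_chain hPre hwfp hdmem hbA
        obtain ⟨row, hrow, hcel⟩ : ∃ row, PySem.List.pyGet? forest (pos.1 + d.1) = some row ∧
            PySem.List.pyGet? row (pos.2 + d.2) = some c := by
          unfold pvCell at hc
          cases h : PySem.List.pyGet? forest (pos.1 + d.1) with
          | none => rw [h] at hc; simp at hc
          | some row => rw [h, Option.bind_some] at hc; exact ⟨row, rfl, hc⟩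
        have hAF : altRow forest (pos.1 + d.1) = some row := by
          rw [altRow_eq_pyGet _ _ (by omega)]; exact hrow
        have hAR : altRow row (pos.2 + d.2) = some c := by
          rw [altRow_eq_pyGet _ _ (by omega)]; exact hcel
        by_cases hskip : c = 0 ∨ c = 1 ∨ c = gid
        · have hcand : pvCandOf R C forest graph idx_graph (pos, gid) d = none := by
            unfold pvCandOf
            rw [if_pos hbA, hc, Option.bind_some]
            exact if_pos hskip
          obtain ⟨out, hrun, hpre, hndo, hwfo, hre, hfo, hgo⟩ := ihds seen hds' hwfp hnd hwfs hb
          refine ⟨out, ?_, hpre, hndo, hwfo, hre, ?_, hgo⟩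
          · simp only [dfsB, hAF, hAR, hwin, hskip]
            simpa using hrun
          · intro d0 hd0 m hm
            rcases List.mem_cons.mp hd0 with h | h
            · subst h; rw [hcand] at hm; cases hm
            · exact hfo d0 h m hm
        · obtain ⟨nid, nb, hi, hg, _, _, _, ⟨p, hp⟩, _⟩ := hchain hskip
          have hIdx : altIdx idx_graph (pos.1 + d.1) (pos.2 + d.2) = some nid := by
            rw [altIdx_eq]; exact hi
          have hGol : altGolem graph nid = some nb := by
            rw [altGolem_eq]; exact hg
          have hcand : pvCandOf R C forest graph idx_graph (pos, gid) d = some (p, nid) := by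
            unfold pvCandOf
            rw [if_pos hbA, hc, Option.bind_some, if_neg hskip, hi, Option.bind_some, hg,
              Option.bind_some, hp, Option.map_some]
          by_cases hv : p ∈ seen.map (fun s => s.1)
          · obtain ⟨out, hrun, hpre, hndo, hwfo, hre, hfo, hgo⟩ := ihds seen hds' hwfp hnd hwfs hb
            refine ⟨out, ?_, hpre, hndo, hwfo, hre, ?_, hgo⟩
            · simp only [dfsB, hAF, hAR, hwin, hskip, hIdx, hGol, hp, hv]
              simpa using hrun
            · intro d0 hd0 m hm
              rcases List.mem_cons.mp hd0 with h | h
              · subst h; rw [hcand] at hm; cases hm; exact prefix_map_mem hpre hv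
              · exact hfo d0 h m hm
          · -- fresh discovery: recurse into the neighbour first, then the remaining directions
            have hwfnew : pvWfN graph ((p, nid) : PvNode) := pre_cand_wf hPre hwfp hdmem hcand
            have hnd1 : ((seen ++ [((p, nid) : PvNode)]).map (fun it => it.1)).Nodup := by
              rw [List.map_append, List.nodup_append]
              refine ⟨hnd, List.nodup_singleton _, ?_⟩
              intro a ha b hb
              rcases List.mem_singleton.mp hb with rfl
              intro hab; subst hab; exact hv ha
            have hwf1 : ∀ n ∈ seen ++ [((p, nid) : PvNode)], pvWfN graph n := by
              intro n hn
              rcases List.mem_append.mp hn with h | h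
              · exact hwfs n h
              · rcases List.mem_singleton.mp h with rfl; exact hwfnew
            have hb1 : graph.length + 1 ≤ f + (seen ++ [((p, nid) : PvNode)]).length := by
              rw [List.length_append]
              simp only [List.length_cons, List.length_nil]
              omega
            obtain ⟨out1, hrun1, hpre1, hnd1', hwf1', hre1, hf1, hg1⟩ :=
              ihf dfsDirsB nid p (seen ++ [((p, nid) : PvNode)])
                (by intro d' hd'; simpa [dfsDirsB, pvDirs4] using hd') hwfnew hnd1 hwf1 hb1
            have hlen1 : seen.length + 1 ≤ out1.length := by
              have := hpre1.length_le
              rw [List.length_append] at this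
              simp only [List.length_cons, List.length_nil] at this
              omega
            obtain ⟨out, hrun, hpre', hndo, hwfo, hre, hfo, hgo⟩ := ihds out1 hds' hwfp hnd1' hwf1'
              (by omega)
            have hpre0 : (seen : List PvNode) <+: out1 := (List.prefix_append seen _).trans hpre1
            have hstep : dfsB R C forest graph idx_graph (f + 1) gid pos (d :: ds) seen = some out := by
              simp only [dfsB, hAF, hAR, hwin, hskip, hIdx, hGol, hp, hv]
              rw [dif_neg (by omega : ¬ f + 1 = 0)]
              rw [show f + 1 - 1 = f from rfl, hrun1]
              simpa using hrun
            refine ⟨out, hstep, hpre0.trans hpre', hndo, hwfo, ?_, ?_, ?_⟩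
            · intro n hn
              rcases hre n hn with h | h
              · rcases hre1 n h with h' | h'
                · rcases List.mem_append.mp h' with h'' | h''
                  · exact Or.inl h''
                  · rcases List.mem_singleton.mp h'' with rfl
                    exact Or.inr (Relation.ReflTransGen.single ⟨d, hdmem, hcand⟩)
                · exact Or.inr (Relation.ReflTransGen.head ⟨d, hdmem, hcand⟩ h')
              · exact Or.inr h
            · intro d0 hd0 m hm
              rcases List.mem_cons.mp hd0 with h | h
              · subst h
                rw [hcand] at hm
                cases hm
                refine prefix_map_mem hpre' (prefix_map_mem hpre1 ?_)
                rw [List.map_append]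
                exact List.mem_append_right _ (by simp)
              · exact hfo d0 h m hm
            · intro n hn hns d0 hd0 m hm
              by_cases hno1 : n ∈ out1
              · by_cases hns1 : n ∈ seen ++ [((p, nid) : PvNode)]
                · rcases List.mem_append.mp hns1 with h | h
                  · exact absurd h hns
                  · rcases List.mem_singleton.mp h with rfl
                    exact prefix_map_mem hpre'
                      (hf1 d0 (by simpa [dfsDirsB, pvDirs4] using hd0) m hm)
                · exact prefix_map_mem hpre' (hg1 n hno1 hns1 d0 hd0 m hm)
              · exact hgo n hn hno1 d0 hd0 m hm
      · have hwinN : ¬(0 ≤ pos.1 + d.1 ∧ pos.1 + d.1 < R + 3 ∧ 0 ≤ pos.2 + d.2 ∧ pos.2 + d.2 < C) := by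
          omega
        have hcand : pvCandOf R C forest graph idx_graph (pos, gid) d = none := by
          unfold pvCandOf; exact if_neg hbA
        obtain ⟨out, hrun, hpre, hndo, hwfo, hre, hfo, hgo⟩ := ihds seen hds' hwfp hnd hwfs hb
        refine ⟨out, ?_, hpre, hndo, hwfo, hre, ?_, hgo⟩
        · simp only [dfsB, hwinN]
          simpa using hrun
        · intro d0 hd0 m hm
          rcases List.mem_cons.mp hd0 with h | h
          · subst h; rw [hcand] at hm; cases hm
          · exact hfo d0 h m hm

-- ---- maximum characterisation: pvL depends only on membership ----
theorem pv_foldl_max_ge {graph : List (Int × (List (Int × Int)) × Int)} :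
    ∀ (t : List PvNode) (a : Int),
      a ≤ t.foldl (fun x it => max x (pvV graph it.2)) a := by
  intro t
  induction t with
  | nil => intro a; exact le_refl a
  | cons n t ih =>
    intro a
    exact le_trans (le_max_left a (pvV graph n.2)) (ih (max a (pvV graph n.2)))

theorem pv_foldl_max_le {graph : List (Int × (List (Int × Int)) × Int)} :
    ∀ (t : List PvNode) (a : Int), ∀ n ∈ t,
      pvV graph n.2 ≤ t.foldl (fun x it => max x (pvV graph it.2)) a := by
  intro t
  induction t with
  | nil => intro a n hn; simp at hn
  | cons n0 t ih =>
    intro a n hn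
    rcases List.mem_cons.mp hn with h | h
    · subst h
      exact le_trans (le_max_right a (pvV graph n.2)) (pv_foldl_max_ge t _)
    · exact ih _ n h

theorem pv_foldl_max_cases {graph : List (Int × (List (Int × Int)) × Int)} :
    ∀ (t : List PvNode) (a : Int),
      t.foldl (fun x it => max x (pvV graph it.2)) a = a ∨
        ∃ n ∈ t, t.foldl (fun x it => max x (pvV graph it.2)) a = pvV graph n.2 := by
  intro t
  induction t with
  | nil => intro a; exact Or.inl rfl
  | cons n0 t ih =>
    intro a
    rcases ih (max a (pvV graph n0.2)) with h | ⟨n, hn, h⟩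
    · rw [List.foldl_cons, h]
      rcases le_total a (pvV graph n0.2) with hle | hle
      · exact Or.inr ⟨n0, List.mem_cons_self, by omega⟩
      · exact Or.inl (by omega)
    · exact Or.inr ⟨n, List.mem_cons_of_mem _ hn, by rw [List.foldl_cons]; exact h⟩

theorem pvL_le {graph : List (Int × (List (Int × Int)) × Int)} {l : List PvNode} {n : PvNode}
    (hn : n ∈ l) : pvV graph n.2 ≤ pvL graph l := by
  cases l with
  | nil => simp at hn
  | cons r t =>
    rcases List.mem_cons.mp hn with h | h
    · subst h; exact pv_foldl_max_ge t _
    · exact pv_foldl_max_le t _ n h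

theorem pvL_mem {graph : List (Int × (List (Int × Int)) × Int)} {l : List PvNode}
    (h : l ≠ []) : ∃ n ∈ l, pvL graph l = pvV graph n.2 := by
  cases l with
  | nil => exact absurd rfl h
  | cons r t =>
    rcases pv_foldl_max_cases t (pvV graph r.2) with h' | ⟨n, hn, h'⟩
    · exact ⟨r, List.mem_cons_self, h'⟩
    · exact ⟨n, List.mem_cons_of_mem _ hn, h'⟩

theorem pvL_eq_of_mem_iff {graph : List (Int × (List (Int × Int)) × Int)} {u v : List PvNode}
    (hu : u ≠ []) (hv : v ≠ []) (h : ∀ n, n ∈ u ↔ n ∈ v) : pvL graph u = pvL graph v := by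
  apply le_antisymm
  · obtain ⟨n, hn, he⟩ := pvL_mem (graph := graph) hu
    rw [he]
    exact pvL_le ((h n).mp hn)
  · obtain ⟨n, hn, he⟩ := pvL_mem (graph := graph) hv
    rw [he]
    exact pvL_le ((h n).mpr hn)

-- ---- membership in a closed reachable discovered list is exactly reachability ----
theorem mem_iff_reach {R C : Int} {forest : List (List Int)} {graph : List (Int × (List (Int × Int)) × Int)} {idx_graph : List (Int × Int × Int)} {own_id : Int}
    (hPre : Pre_get_lower_bound R C forest graph idx_graph own_id) (s : PvNode)
    {u : List PvNode} (hs : s ∈ u) (hwf : ∀ n ∈ u, pvWfN graph n)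
    (hreach : ∀ n ∈ u, pvReach R C forest graph idx_graph s n)
    (hcl : ∀ n ∈ u, ∀ d ∈ pvDirs4, ∀ m, pvCandOf R C forest graph idx_graph n d = some m →
      m.1 ∈ u.map (fun it => it.1)) :
    ∀ n, n ∈ u ↔ pvReach R C forest graph idx_graph s n := by
  intro n
  constructor
  · exact hreach n
  · intro hr
    induction hr with
    | refl => exact hs
    | @tail b c hab hbc ih =>
      obtain ⟨d, hd, hcand⟩ := hbc
      have hmem := hcl b ih d hd c hcand
      obtain ⟨m', hm', he⟩ := List.mem_map.mp hmem
      have hwfc := pre_cand_wf hPre (hwf b ih) hd hcand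
      have := pv_wf_inj hPre.2.2.2 (hwf m' hm') hwfc he
      rw [← this]
      exact hm'

-- ===== VERDICT (by name: the statement is the Claim_ definition above) =====
theorem get_lower_bound_spec : Claim_equal_get_lower_bound := by
  intro R C forest graph idx_graph own_id hDom hPre
  unfold Spec_get_lower_bound
  have hownOK := hPre.2.1
  unfold pvOwnOK at hownOK
  obtain ⟨ld, hld⟩ : ∃ ld, pvGLook graph own_id = some ld := by
    cases hg : pvGLook graph own_id with
    | none => rw [hg] at hownOK; simp at hownOK
    | some ld => exact ⟨ld, rfl⟩
  rw [hld] at hownOK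
  unfold pvEntryWF at hownOK
  simp only [Bool.and_eq_true, decide_eq_true_eq] at hownOK
  obtain ⟨⟨h3own, hloown⟩, hhiown⟩ := hownOK
  obtain ⟨esc, hesc⟩ := pv_getd (locs := ld.1) hloown hhiown
  obtain ⟨l2, hl2⟩ := pv_get2 h3own
  have hwfstart : pvWfN graph ((esc : Int × Int), own_id) :=
    ⟨ld, hld, h3own, hloown, hhiown, hesc⟩
  have hwf0 : ∀ n ∈ ([((esc : Int × Int), own_id)] : List PvNode), pvWfN graph n := by
    intro n hn
    simp only [List.mem_singleton] at hn
    subst hn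
    exact hwfstart
  have hnd0 : (([((esc : Int × Int), own_id)] : List PvNode).map (fun it => it.1)).Nodup := by simp
  have hcl0 : pvClosed R C forest graph idx_graph [((esc : Int × Int), own_id)] 0 := by
    intro i hi
    exact absurd hi (Nat.not_lt_zero i)
  have hre0 : ∀ n ∈ ([((esc : Int × Int), own_id)] : List PvNode),
      pvReach R C forest graph idx_graph ((esc : Int × Int), own_id) n := by
    intro n hn
    simp only [List.mem_singleton] at hn
    subst hn
    exact Relation.ReflTransGen.refl
  obtain ⟨rsF, habsF, hndF, hwfF, hclF, hreF⟩ := pvAbsLoop_good hPre ((esc : Int × Int), own_id)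
    (graph.length + 2) [((esc : Int × Int), own_id)] 0 hnd0 hwf0 hcl0 hre0 (Nat.zero_le _)
    (by omega)
  have hpvL0 : pvL graph [((esc : Int × Int), own_id)] = l2.1 := by
    simp [pvL, pvV, hld, hl2]
  have hA := bfs_abs hPre (graph.length + 2) [((esc : Int × Int), own_id)] 0
    (Nat.zero_le _) (by simp) hwf0
  rw [habsF, List.drop_zero, hpvL0] at hA
  simp only [List.map_cons, List.map_nil] at hA
  have hset : PySem.Set.add PySem.Set.empty esc = [esc] := rfl
  have hAval : get_lower_bound R C forest graph idx_graph own_id = pvL graph rsF - 2 := by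
    unfold get_lower_bound
    simp only [hld, hesc, hl2, hset]
    rw [hA]
    rfl
  have hstartF : ((esc : Int × Int), own_id) ∈ rsF :=
    (pvAbsLoop_prefix _ _ _ _ habsF).subset (List.mem_singleton.mpr rfl)
  have hneF : rsF ≠ [] := fun hcon => by rw [hcon] at hstartF; simp at hstartF
  -- the B side
  obtain ⟨out, hdfs, hpre, hndB, hwfB, hreB', hfB, hgB⟩ := dfs_spec hPre (graph.length + 2)
    dfsDirsB own_id (esc : Int × Int) [((esc : Int × Int), own_id)]
    (by intro d hd; simpa [dfsDirsB, pvDirs4] using hd) hwfstart hnd0 hwf0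
    (by simp only [List.length_cons, List.length_nil]; omega)
  have hstartB : ((esc : Int × Int), own_id) ∈ out :=
    hpre.subset (List.mem_singleton.mpr rfl)
  have hneB : out ≠ [] := fun hcon => by rw [hcon] at hstartB; simp at hstartB
  have hreB : ∀ n ∈ out, pvReach R C forest graph idx_graph ((esc : Int × Int), own_id) n := by
    intro n hn
    rcases hreB' n hn with h | h
    · simp only [List.mem_singleton] at h
      subst h
      exact Relation.ReflTransGen.refl
    · exact h
  have hclB : ∀ n ∈ out, ∀ d ∈ pvDirs4, ∀ m,
      pvCandOf R C forest graph idx_graph n d = some m → m.1 ∈ out.map (fun it => it.1) := by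
    intro n hn d hd m hm
    by_cases hns : n ∈ ([((esc : Int × Int), own_id)] : List PvNode)
    · simp only [List.mem_singleton] at hns
      subst hns
      exact hfB d (by simpa [dfsDirsB, pvDirs4] using hd) m hm
    · exact hgB n hn hns d hd m hm
  -- the two discovered lists have the same members
  have hiffF := mem_iff_reach hPre ((esc : Int × Int), own_id) hstartF hwfF hreF
    (closed_all_of_pvClosed hclF)
  have hiffB := mem_iff_reach hPre ((esc : Int × Int), own_id) hstartB hwfB hreB hclB
  have hmemiff : ∀ n, n ∈ rsF ↔ n ∈ out := by
    intro n
    rw [hiffF n, hiffB n]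
  have hLeq : pvL graph rsF = pvL graph out := pvL_eq_of_mem_iff hneF hneB hmemiff
  -- evaluate B's port
  have hBval : get_lower_bound_alt R C forest graph idx_graph own_id = pvL graph out - 2 := by
    unfold get_lower_bound_alt
    rw [altGolem_eq]
    simp only [hld, hesc, hdfs]
    cases hout : out with
    | nil => exact absurd hout hneB
    | cons s t =>
      have hwfs : pvWfN graph s := hwfB s (by rw [hout]; exact List.mem_cons_self)
      obtain ⟨e, hG, h3, _, _, _⟩ := hwfs
      obtain ⟨q, hq⟩ := pv_get2 h3
      have hval : altVal graph s.2 = some (pvV graph s.2) := by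
        unfold altVal pvV
        rw [altGolem_eq]
        simp only [hG, hq]
      simp only [hval]
      have hmax : ∀ (t' : List PvNode) (a : Int), (∀ n ∈ t', pvWfN graph n) →
          altMaxFrom graph a t' = some (t'.foldl (fun x it => max x (pvV graph it.2)) a) := by
        intro t'
        induction t' with
        | nil => intro a _; rfl
        | cons n0 t' ih =>
          intro a hwf'
          have hwfn := hwf' n0 List.mem_cons_self
          obtain ⟨e', hG', h3', _, _, _⟩ := hwfn
          obtain ⟨q', hq'⟩ := pv_get2 h3'
          have hval' : altVal graph n0.2 = some (pvV graph n0.2) := by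
            unfold altVal pvV
            rw [altGolem_eq]
            simp only [hG', hq']
          rw [List.foldl_cons]
          show altMaxFrom graph a (n0 :: t') = _
          unfold altMaxFrom
          rw [hval']
          exact ih (max a (pvV graph n0.2)) (fun n hn => hwf' n (List.mem_cons_of_mem _ hn))
      simp only [hmax t (pvV graph s.2)
        (fun n hn => hwfB n (by rw [hout]; exact List.mem_cons_of_mem _ hn))]
      rfl
  rw [hAval, hBval, hLeq]
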